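-- pv_equiv track=rewrite | github.com/mikek1337/alx-system_engineering-devops | 0x16-api_advanced/100-count.py | count_exist
-- ===== SOURCE A (Python) =====
-- def count_exist(word_list, title, count, index):
--     if (len(word_list) == index):
--         return count
--     title = title.lower()
--     word = word_list[index].lower()
--     count += title.count(word)
--     index += 1
--     return count_exist(word_list, title, count, index)
-- ===== SOURCE B (Python) =====
-- def count_exist(word_list, title, count, index):
--     title_lower = title.lower()
--     return count + sum(title_lower.count(w.lower()) for w in word_list[index:])
-- ===== Notes on version B (the rewrite author's own statement) =====
-- stated objective: idiomatic
-- what changed: Replaces A's tail recursion (which re-lowercases the title on every call) with a single generator-sum over the slice word_list[index:], lowercasing the title once.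
-- intended difference: For in-range negative index, A's wraparound counts the words word_list[index:] and then, after index reaches 0, all words a second time, so whenever some word occurs in the title A returns an inflated total; B counts only word_list[index:], the intended 'remaining words from index on'. — e.g. on count_exist(["a"], "a", 0, -1): A returns 2, B returns 1
import Mathlib
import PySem

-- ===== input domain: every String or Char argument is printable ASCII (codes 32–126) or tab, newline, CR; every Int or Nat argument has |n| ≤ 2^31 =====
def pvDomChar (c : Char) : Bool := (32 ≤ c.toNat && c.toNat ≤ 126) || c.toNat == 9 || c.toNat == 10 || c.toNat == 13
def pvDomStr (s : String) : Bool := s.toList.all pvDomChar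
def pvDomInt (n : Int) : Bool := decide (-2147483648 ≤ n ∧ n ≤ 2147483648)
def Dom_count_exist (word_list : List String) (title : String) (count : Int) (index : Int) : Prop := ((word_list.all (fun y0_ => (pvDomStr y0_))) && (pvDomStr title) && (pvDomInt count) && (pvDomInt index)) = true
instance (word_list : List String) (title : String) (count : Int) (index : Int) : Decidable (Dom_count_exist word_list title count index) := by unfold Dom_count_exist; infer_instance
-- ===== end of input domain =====

-- B replaces A's tail recursion (which re-lowercases the title on every call) by one sum over
-- the slice word_list[index:], lowercasing the title once; equality of RETURN values is proved.

-- ===== PORT A =====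
-- A's recursion, with a fuel guard that only makes the same computation total (2*len+1 steps
-- always suffice on the inputs admitted by Pre_); each step is A's code line for line.
def countExistGo (word_list : List String) (fuel : Nat) (title : String) (count : Int) (index : Int) : Int :=
  match fuel with
  | 0 => 0
  | Nat.succ fuel =>
    if (word_list.length : Int) = index then count
    else
      let title2 := PySem.Str.lower title
      match PySem.List.pyGet? word_list index with
      | none => 0  -- IndexError in Python; excluded by Pre_
      | some w =>
        let word := PySem.Str.lower w
        countExistGo word_list fuel title2 (count + (PySem.Str.count title2 word : Int)) (index + 1)

def count_exist (word_list : List String) (title : String) (count : Int) (index : Int) : Int :=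
  countExistGo word_list (2 * word_list.length + 1) title count index

-- ===== PORT B =====
def count_exist_alt (word_list : List String) (title : String) (count : Int) (index : Int) : Int :=
  let title_lower := PySem.Str.lower title
  count + ((PySem.List.slice word_list (some index) none).map
            (fun w => (PySem.Str.count title_lower (PySem.Str.lower w) : Int))).sum

-- ===== PRECONDITION & SPEC =====
-- Pre_ excludes exactly the inputs where A raises IndexError at word_list[index]
-- (index > len(word_list) or index < -len(word_list)); A returns on all admitted inputs.
def Pre_count_exist (word_list : List String) (title : String) (count : Int) (index : Int) : Prop :=
  -(word_list.length : Int) ≤ index ∧ index ≤ (word_list.length : Int)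
instance (word_list : List String) (title : String) (count : Int) (index : Int) : Decidable (Pre_count_exist word_list title count index) := by unfold Pre_count_exist; infer_instance
def pvWitness_count_exist : List String × String × Int × Int := (["Ab", "b"], "xAbab", 1, 0)

-- For in-range negative index, A's wraparound counts the words word_list[index:] and then, after the
-- index reaches 0, ALL words a second time, so whenever some word occurs in the title A returns an
-- inflated total; B counts only word_list[index:], the intended 'remaining words from index on'.
def D_count_exist (word_list : List String) (title : String) (count : Int) (index : Int) : Prop :=
  -(word_list.length : Int) ≤ index ∧ index < 0 ∧
    word_list.any (fun w => PySem.Str.isIn (PySem.Str.lower w) (PySem.Str.lower title)) = true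
instance (word_list : List String) (title : String) (count : Int) (index : Int) : Decidable (D_count_exist word_list title count index) := by unfold D_count_exist; infer_instance

def Spec_count_exist (word_list : List String) (title : String) (count : Int) (index : Int) (out : Int) : Prop := ¬ D_count_exist word_list title count index → out = count_exist_alt word_list title count index
instance (word_list : List String) (title : String) (count : Int) (index : Int) (out : Int) : Decidable (Spec_count_exist word_list title count index out) := by unfold Spec_count_exist; infer_instance

def pvDiffWitness_count_exist : List String × String × Int × Int := (["a"], "a", 0, -1)
def pvDiffWitnessOut_count_exist : Int × Int := (2, 1)

-- ===== CLAIM (what is proved, stated in full; the proofs are below) =====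
def Claim_unchanged_count_exist : Prop := ∀ (word_list : List String) (title : String) (count : Int) (index : Int), Dom_count_exist word_list title count index → Pre_count_exist word_list title count index → Spec_count_exist word_list title count index (count_exist word_list title count index)
def Claim_changed_count_exist : Prop := Dom_count_exist (pvDiffWitness_count_exist.1) (pvDiffWitness_count_exist.2.1) (pvDiffWitness_count_exist.2.2.1) (pvDiffWitness_count_exist.2.2.2) ∧ Pre_count_exist (pvDiffWitness_count_exist.1) (pvDiffWitness_count_exist.2.1) (pvDiffWitness_count_exist.2.2.1) (pvDiffWitness_count_exist.2.2.2) ∧ D_count_exist (pvDiffWitness_count_exist.1) (pvDiffWitness_count_exist.2.1) (pvDiffWitness_count_exist.2.2.1) (pvDiffWitness_count_exist.2.2.2) ∧ count_exist (pvDiffWitness_count_exist.1) (pvDiffWitness_count_exist.2.1) (pvDiffWitness_count_exist.2.2.1) (pvDiffWitness_count_exist.2.2.2) = pvDiffWitnessOut_count_exist.1 ∧ count_exist_alt (pvDiffWitness_count_exist.1) (pvDiffWitness_count_exist.2.1) (pvDiffWitness_count_exist.2.2.1) (pvDiffWitness_count_exist.2.2.2) = pvDiffWitnessOut_count_exist.2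 ∧ pvDiffWitnessOut_count_exist.1 ≠ pvDiffWitnessOut_count_exist.2
def Claim_exact_count_exist : Prop := ∀ (word_list : List String) (title : String) (count : Int) (index : Int), Dom_count_exist word_list title count index → Pre_count_exist word_list title count index → D_count_exist word_list title count index → count_exist word_list title count index ≠ count_exist_alt word_list title count index

-- ===== LEMMAS AND PROOFS =====

-- the count one word w contributes: occurrences of w.lower() in title.lower()
def pvCnt (title w : String) : Int := (PySem.Str.count (PySem.Str.lower title) (PySem.Str.lower w) : Int)

theorem pvLowerChar_idem (c : Char) : PySem.Chars.lowerChar (PySem.Chars.lowerChar c) = PySem.Chars.lowerChar c := by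
  unfold PySem.Chars.lowerChar PySem.Chars.isupper
  split_ifs with h1 h2 <;> try rfl
  exfalso
  simp only [Bool.and_eq_true, decide_eq_true_eq] at h1 h2
  have hA1 : ('A' : Char).toNat ≤ c.toNat := Fin.mk_le_mk.mp h1.1
  have hZ1 : c.toNat ≤ ('Z' : Char).toNat := Fin.mk_le_mk.mp h1.2
  have eA : ('A' : Char).toNat = 65 := rfl
  have eZ : ('Z' : Char).toNat = 90 := rfl
  have hv : (c.toNat + 32).isValidChar := by unfold Nat.isValidChar; left; omega
  have h2' : (Char.ofNat (c.toNat + 32)).toNat ≤ ('Z' : Char).toNat := Fin.mk_le_mk.mp h2.2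
  have e3 : (Char.ofNat (c.toNat + 32)).toNat = c.toNat + 32 := by
    rw [Char.toNat_ofNat]; exact if_pos hv
  omega

theorem pvLowerChars_idem (l : List Char) : PySem.Chars.lower (PySem.Chars.lower l) = PySem.Chars.lower l := by
  simp [PySem.Chars.lower, List.map_map, Function.comp_def, pvLowerChar_idem]

theorem pvLower_idem (s : String) : PySem.Str.lower (PySem.Str.lower s) = PySem.Str.lower s := by
  apply String.toList_injective
  simp [PySem.Str.toList_lower, pvLowerChars_idem]

theorem pvCnt_lower (t w : String) : pvCnt (PySem.Str.lower t) w = pvCnt t w := by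
  simp [pvCnt, pvLower_idem]

-- count.go never decreases the accumulator
theorem pvCountGo_le (sub : List Char) (fuel : Nat) : ∀ (l : List Char) (acc : Nat),
    acc ≤ PySem.Chars.count.go sub fuel l acc := by
  induction fuel with
  | zero => intro l acc; rw [PySem.Chars.count.go]
  | succ fuel ih =>
    intro l acc
    match l with
    | [] => simp [PySem.Chars.count.go]
    | h :: t =>
      simp only [PySem.Chars.count.go]
      split
      · exact le_trans (Nat.le_succ acc) (ih _ _)
      · exact ih _ _

-- count.go strictly increases the accumulator iff sub occurs, given enough fuel
theorem pvCountGo_pos (sub : List Char) (hsub : sub ≠ []) (fuel : Nat) : ∀ (l : List Char) (acc : Nat),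
    l.length ≤ fuel → (acc < PySem.Chars.count.go sub fuel l acc ↔ sub <:+: l) := by
  induction fuel with
  | zero =>
    intro l acc hl
    have : l = [] := List.eq_nil_of_length_eq_zero (Nat.le_zero.mp hl)
    subst this
    rw [PySem.Chars.count.go]
    simp [List.infix_nil, hsub]
  | succ fuel ih =>
    intro l acc hl
    match l with
    | [] =>
      simp [PySem.Chars.count.go, List.infix_nil, hsub]
    | h :: t =>
      simp only [PySem.Chars.count.go]
      split
      next hp =>
        constructor
        · intro _
          exact List.IsPrefix.isInfix (List.isPrefixOf_iff_prefix.mp hp)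
        · intro _
          exact Nat.lt_of_lt_of_le (Nat.lt_succ_self acc) (pvCountGo_le sub fuel _ _)
      next hp =>
        rw [ih t acc (by simpa using Nat.le_of_succ_le_succ (by simpa using hl))]
        rw [List.infix_cons_iff]
        have : ¬ sub <+: (h :: t) := by
          rw [← List.isPrefixOf_iff_prefix]; simpa using hp
        tauto

theorem pvCount_pos_iff (s sub : List Char) : 0 < PySem.Chars.count s sub ↔ sub <:+: s := by
  unfold PySem.Chars.count
  by_cases hsub : sub = []
  · simp [hsub]
  · rw [if_neg (by simpa [List.isEmpty_iff] using hsub)]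
    exact pvCountGo_pos sub hsub s.length s 0 (le_refl _)

-- A's recursion from a nonnegative index k ≤ len: counts the words from k on, once
theorem pvGo_nonneg (wl : List String) (fuel : Nat) : ∀ (k : Nat) (title : String) (count : Int),
    k ≤ wl.length → wl.length - k < fuel →
    countExistGo wl fuel title count (k : Int) = count + ((wl.drop k).map (fun w => pvCnt title w)).sum := by
  induction fuel with
  | zero => intro k title count hk hf; omega
  | succ fuel ih =>
    intro k title count hk hf
    rw [countExistGo]
    by_cases hkl : k = wl.length
    · subst hkl; simp
    · have hlt : k < wl.length := Nat.lt_of_le_of_ne hk hkl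
      rw [if_neg (by exact_mod_cast fun h => hkl (by omega))]
      have hget : PySem.List.pyGet? wl (k : Int) = some wl[k] := by
        simp [PySem.List.pyGet?_natCast, List.getElem?_eq_getElem hlt]
      rw [hget]
      dsimp only
      have : ((k : Int) + 1) = ((k + 1 : Nat) : Int) := by push_cast; ring
      rw [this, ih (k+1) (PySem.Str.lower title) _ (by omega) (by omega)]
      rw [List.drop_eq_getElem_cons hlt]
      simp only [List.map_cons, List.sum_cons, pvCnt_lower]
      have : pvCnt title wl[k] = (PySem.Str.count (PySem.Str.lower title) (PySem.Str.lower wl[k]) : Int) := rfl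
      rw [← this]
      ring

-- A's recursion from an in-range negative index -k: the last k words, then ALL words again
theorem pvGo_neg (wl : List String) (fuel : Nat) : ∀ (k : Nat) (title : String) (count : Int),
    0 < k → k ≤ wl.length → wl.length + k < fuel →
    countExistGo wl fuel title count (-(k : Int)) =
      count + ((wl.drop (wl.length - k)).map (fun w => pvCnt title w)).sum
            + (wl.map (fun w => pvCnt title w)).sum := by
  induction fuel with
  | zero => intro k title count hk0 hk hf; omega
  | succ fuel ih =>
    intro k title count hk0 hk hf
    have hn : 0 < wl.length := by omega
    rw [countExistGo]
    rw [if_neg (by intro h; omega)]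
    have hlt : wl.length - k < wl.length := by omega
    have hget : PySem.List.pyGet? wl (-(k : Int)) = some wl[wl.length - k] := by
      rw [PySem.List.pyGet?_neg_natCast _ _ hk0 hk]
      simp [List.getElem?_eq_getElem hlt]
    rw [hget]
    dsimp only
    have hc : pvCnt title wl[wl.length - k] = (PySem.Str.count (PySem.Str.lower title) (PySem.Str.lower wl[wl.length - k]) : Int) := rfl
    by_cases hk1 : k = 1
    · subst hk1
      have : (-((1:Nat) : Int) + 1) = ((0 : Nat) : Int) := by norm_num
      rw [this, pvGo_nonneg wl fuel 0 _ _ (by omega) (by omega)]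
      simp only [List.drop_zero]
      have hdrop : wl.drop (wl.length - 1) = [wl[wl.length - 1]] := by
        rw [List.drop_eq_getElem_cons hlt]
        simp [show wl.length - 1 + 1 = wl.length by omega]
      simp only [hdrop, List.map_cons, List.map_nil, List.sum_cons, List.sum_nil, pvCnt_lower, ← hc]
      ring
    · have hk2 : 2 ≤ k := by omega
      have : (-(k : Int) + 1) = -(((k - 1 : Nat)) : Int) := by omega
      rw [this, ih (k-1) _ _ (by omega) (by omega) (by omega)]
      have hdrop : wl.drop (wl.length - k) = wl[wl.length - k] :: wl.drop (wl.length - (k - 1)) := by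
        have e : wl.length - k + 1 = wl.length - (k - 1) := by omega
        rw [List.drop_eq_getElem_cons hlt, e]
      simp only [hdrop, List.map_cons, List.sum_cons, pvCnt_lower, ← hc]
      ring

theorem pvAlt_nonneg (wl : List String) (k : Nat) (title : String) (count : Int) :
    count_exist_alt wl title count (k : Int) = count + ((wl.drop k).map (fun w => pvCnt title w)).sum := by
  simp [count_exist_alt, PySem.List.slice_from_natCast, pvCnt]

theorem pvAlt_neg (wl : List String) (k : Nat) (title : String) (count : Int) (hk0 : 0 < k) :
    count_exist_alt wl title count (-(k : Int)) =
      count + ((wl.drop (wl.length - k)).map (fun w => pvCnt title w)).sum := by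
  simp [count_exist_alt, PySem.List.slice_from_neg_natCast _ _ hk0, pvCnt]

-- ===== VERDICT =====
theorem pvCnt_nonneg (t w : String) : 0 ≤ pvCnt t w := Int.natCast_nonneg _

theorem pvCnt_eq_zero_of_not_isIn (t w : String)
    (h : ¬ PySem.Str.isIn (PySem.Str.lower w) (PySem.Str.lower t) = true) : pvCnt t w = 0 := by
  rw [Bool.not_eq_true] at h
  unfold pvCnt
  rw [PySem.Str.count_eq]
  have hni : ¬ (PySem.Str.lower w).toList <:+: (PySem.Str.lower t).toList := by
    rw [← PySem.Chars.isIn_eq_false_iff]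
    simpa using h
  have h0 : PySem.Chars.count (PySem.Str.lower t).toList (PySem.Str.lower w).toList = 0 := by
    by_contra hne
    exact hni ((pvCount_pos_iff _ _).mp (Nat.pos_of_ne_zero hne))
  simpa [PySem.Str.toList_lower] using congrArg (Int.ofNat) h0

theorem count_exist_spec : Claim_unchanged_count_exist := by
  intro wl title count index _ hpre hnd
  unfold Pre_count_exist at hpre
  unfold count_exist
  by_cases hpos : 0 ≤ index
  · obtain ⟨k, rfl⟩ : ∃ k : Nat, index = (k : Int) := ⟨index.toNat, (Int.toNat_of_nonneg hpos).symm⟩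
    rw [pvGo_nonneg wl _ k title count (by exact_mod_cast hpre.2) (by omega),
        pvAlt_nonneg]
  · have hk0 : 0 < (-index).toNat := by omega
    have hik : index = -(((-index).toNat : Nat) : Int) := by omega
    have hk : (-index).toNat ≤ wl.length := by omega
    have hz : ∀ w ∈ wl, pvCnt title w = 0 := by
      intro w hw
      apply pvCnt_eq_zero_of_not_isIn
      intro hin
      exact hnd ⟨hpre.1, by omega, List.any_eq_true.mpr ⟨w, hw, hin⟩⟩
    have hsum0 : ∀ (l : List String), (∀ w ∈ l, w ∈ wl) → (l.map (fun w => pvCnt title w)).sum = 0 := by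
      intro l hl
      apply List.sum_eq_zero
      intro x hx
      obtain ⟨w, hw, rfl⟩ := List.mem_map.mp hx
      exact hz w (hl w hw)
    rw [hik, pvGo_neg wl _ _ title count hk0 hk (by omega),
        pvAlt_neg _ _ _ _ hk0,
        hsum0 _ (fun w hw => List.mem_of_mem_drop hw),
        hsum0 _ (fun w hw => hw)]
    ring

theorem count_exist_changed : Claim_changed_count_exist := by
  unfold Claim_changed_count_exist; decide

theorem count_exist_tight : Claim_exact_count_exist := by
  intro wl title count index _ hpre hd
  unfold Pre_count_exist at hpre
  obtain ⟨_, hneg, hany⟩ := hd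
  have hk0 : 0 < (-index).toNat := by omega
  have hik : index = -(((-index).toNat : Nat) : Int) := by omega
  have hk : (-index).toNat ≤ wl.length := by omega
  obtain ⟨w, hw, hin⟩ := List.any_eq_true.mp hany
  have hinf : (PySem.Str.lower w).toList <:+: (PySem.Str.lower title).toList := by
    rw [← PySem.Chars.isIn_iff_infix]
    simpa using hin
  have hcw : 1 ≤ pvCnt title w := by
    unfold pvCnt
    rw [PySem.Str.count_eq]
    exact_mod_cast (pvCount_pos_iff _ _).mpr hinf
  have hsum : 1 ≤ (wl.map (fun w => pvCnt title w)).sum := by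
    calc (1 : Int) ≤ pvCnt title w := hcw
    _ ≤ (wl.map (fun w => pvCnt title w)).sum := by
        apply List.single_le_sum
        · intro x hx
          obtain ⟨v, _, rfl⟩ := List.mem_map.mp hx
          exact pvCnt_nonneg title v
        · exact List.mem_map.mpr ⟨w, hw, rfl⟩
  unfold count_exist
  rw [hik, pvGo_neg wl _ _ title count hk0 hk (by omega), pvAlt_neg _ _ _ _ hk0]
  omega
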